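-- pv_equiv track=rewrite | github.com/pedro31415/Search_Algorithms | Search_algorithms_IA.py | dfs
-- ===== SOURCE A (Python) =====
-- def dfs(graph, result, goal):
--     stack = [(result, [result], 0),]
--     visited = set()
--
--
--     while stack:
--         node, path, cost = stack.pop()
--
--         if node in visited:
--             continue
--         visited.add(node)
--
--         if node == goal:
--             return path, cost
--
--         for neighbour, weight in graph.get(node, {}).items():
--             if neighbour not in visited:
--                 stack.append((neighbour, path + [neighbour], cost + weight))
--     return None
-- ===== SOURCE B (Python) =====
-- def dfs(graph, result, goal):
--     visited = set()
--
--     def helper(node, path, cost):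
--         if node in visited:
--             return None
--         visited.add(node)
--         if node == goal:
--             return path, cost
--         for neighbour, weight in reversed(list(graph.get(node, {}).items())):
--             if neighbour not in visited:
--                 found = helper(neighbour, path + [neighbour], cost + weight)
--                 if found is not None:
--                     return found
--         return None
--
--     return helper(result, [result], 0)
-- ===== Notes on version B (the rewrite author's own statement) =====
-- stated objective: alternative
-- what changed: Replaces the iterative explicit-stack loop (which pushes all unvisited neighbour frames and re-checks them on pop) by a recursive DFS helper with a shared visited set that explores reversed neighbour lists and returns the first non-None recursive result.
import Mathlib
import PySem

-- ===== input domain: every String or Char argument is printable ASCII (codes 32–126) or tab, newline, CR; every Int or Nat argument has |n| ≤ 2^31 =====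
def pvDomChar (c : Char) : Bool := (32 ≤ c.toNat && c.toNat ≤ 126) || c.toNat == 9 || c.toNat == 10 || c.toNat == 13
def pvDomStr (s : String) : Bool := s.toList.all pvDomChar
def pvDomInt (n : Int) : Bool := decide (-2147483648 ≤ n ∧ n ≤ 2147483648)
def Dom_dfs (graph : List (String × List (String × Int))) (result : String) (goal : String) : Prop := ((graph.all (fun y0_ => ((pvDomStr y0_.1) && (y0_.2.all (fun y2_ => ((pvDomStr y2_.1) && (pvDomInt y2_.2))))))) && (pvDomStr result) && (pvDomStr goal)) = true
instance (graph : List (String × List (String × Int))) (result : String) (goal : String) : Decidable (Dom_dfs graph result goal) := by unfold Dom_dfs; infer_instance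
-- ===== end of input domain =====

-- B rewrites A's explicit-stack loop as a recursive DFS helper with a shared visited set
-- (objective: alternative decomposition, same asymptotic cost; return value proved equal).

-- graph.get(node, {}) : first-match lookup in the association list (exact: a Python dict has
-- unique keys, so the first match is the only match); shared by both ports
def pvGet (graph : List (String × List (String × Int))) (node : String) : List (String × Int) :=
  match graph with
  | [] => []
  | (k, vs) :: rest => if k = node then vs else pvGet rest node

-- every node name that can ever appear on A's stack / in B's recursion: the source plus all neighbours
def pvNodes (graph : List (String × List (String × Int))) (result : String) : List String :=
  result :: graph.flatMap (fun e => e.2.map Prod.fst)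

-- fuel used as a pure totality guard by both ports; proved large enough below (never reached)
def pvFuel (graph : List (String × List (String × Int))) (result : String) : Nat :=
  (((PySem.List.dedup (pvNodes graph result)).map
      (fun u => 1 + (pvGet graph u).length)).sum) + 2

-- ===== PORT A =====
-- the while-loop over (stack, visited); fuel is a totality guard only (adequacy proved below)
def dfsLoop (graph : List (String × List (String × Int))) (goal : String) :
    Nat → PySem.Set String → List (String × List String × Int) → Option (List String × Int)
  | 0, _, _ => none
  | _ + 1, _, [] => none
  | fuel + 1, visited, (node, path, cost) :: rest =>
    if PySem.Set.contains visited node then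
      dfsLoop graph goal fuel visited rest
    else
      let visited := PySem.Set.add visited node
      if node = goal then some (path, cost)
      else
        dfsLoop graph goal fuel visited
          ((((pvGet graph node).filter
              (fun nw => !(PySem.Set.contains visited nw.1))).map
              (fun nw => (nw.1, path ++ [nw.1], cost + nw.2))).reverse ++ rest)

def dfs (graph : List (String × List (String × Int))) (result : String) (goal : String) :
    Option (List String × Int) :=
  dfsLoop graph goal (pvFuel graph result) PySem.Set.empty [(result, [result], 0)]

-- ===== PORT B =====
-- B's recursive helper; the shared mutated 'visited' is threaded through as the second component;
-- fuel bounds only the recursion depth (a totality guard; proved never reached)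
mutual
def dfsGo (graph : List (String × List (String × Int))) (goal : String)
    (fuel : Nat) (visited : PySem.Set String) (node : String) (path : List String) (cost : Int) :
    Option (List String × Int) × PySem.Set String :=
  match fuel with
  | 0 => (none, visited)
  | fuel + 1 =>
    if PySem.Set.contains visited node then (none, visited)
    else
      let visited := PySem.Set.add visited node
      if node = goal then (some (path, cost), visited)
      else dfsTry graph goal fuel visited path cost
             (pvGet graph node).reverse
termination_by (fuel, 0)

def dfsTry (graph : List (String × List (String × Int))) (goal : String)
    (fuel : Nat) (visited : PySem.Set String) (path : List String) (cost : Int)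
    (nbrs : List (String × Int)) : Option (List String × Int) × PySem.Set String :=
  match nbrs with
  | [] => (none, visited)
  | (nb, w) :: rest =>
    if PySem.Set.contains visited nb then dfsTry graph goal fuel visited path cost rest
    else
      match dfsGo graph goal fuel visited nb (path ++ [nb]) (cost + w) with
      | (some r, v') => (some r, v')
      | (none, v') => dfsTry graph goal fuel v' path cost rest
termination_by (fuel, nbrs.length + 1)
end

def dfs_alt (graph : List (String × List (String × Int))) (result : String) (goal : String) :
    Option (List String × Int) :=
  (dfsGo graph goal (pvFuel graph result) PySem.Set.empty result [result] 0).1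

-- ===== PRECONDITION & SPEC =====
def Spec_dfs (graph : List (String × List (String × Int))) (result : String) (goal : String) (out : Option (List String × Int)) : Prop := out = dfs_alt graph result goal
instance (graph : List (String × List (String × Int))) (result : String) (goal : String) (out : Option (List String × Int)) : Decidable (Spec_dfs graph result goal out) := by unfold Spec_dfs; infer_instance

-- ===== CLAIM (what is proved, stated in full; the proofs are below) =====
def Claim_equal_dfs : Prop := ∀ (graph : List (String × List (String × Int))) (result : String) (goal : String), Dom_dfs graph result goal → Spec_dfs graph result goal (dfs graph result goal)

-- ===== LEMMAS AND PROOFS =====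

-- Bool-level normal form for visited-membership tests
theorem pvContains_eq {s : PySem.Set String} {x : String} :
    PySem.Set.contains s x = decide (x ∈ s) := by
  rw [Bool.eq_iff_iff]
  simp [PySem.Set.contains_iff s x]

-- weight of an unvisited node in A's loop potential: one pop plus its possible pushes
def pvW (graph : List (String × List (String × Int))) (u : String) : Nat :=
  1 + (pvGet graph u).length

def pvUnvis (graph : List (String × List (String × Int))) (result : String)
    (v : PySem.Set String) : List String :=
  (PySem.List.dedup (pvNodes graph result)).filter (fun u => !decide (u ∈ v))

def pvCntW (graph : List (String × List (String × Int))) (result : String)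
    (v : PySem.Set String) : Nat := ((pvUnvis graph result v).map (pvW graph)).sum

def pvCntD (graph : List (String × List (String × Int))) (result : String)
    (v : PySem.Set String) : Nat :=
  ((pvUnvis graph result v).map (fun _ => (1 : Nat))).sum

def pvPhi (graph : List (String × List (String × Int))) (result : String)
    (v : PySem.Set String) (s : List (String × List String × Int)) : Nat :=
  s.length + pvCntW graph result v

-- A's loop run with its canonical (always adequate, proved in pvStab) fuel
def pvAref (graph : List (String × List (String × Int))) (result : String) (goal : String)
    (v : PySem.Set String) (s : List (String × List String × Int)) : Option (List String × Int) :=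
  dfsLoop graph goal (pvPhi graph result v s + 1) v s

def pvFrames (path : List String) (cost : Int) (nbrs : List (String × Int)) :
    List (String × List String × Int) :=
  nbrs.map (fun nw => (nw.1, path ++ [nw.1], cost + nw.2))

-- invariant: every node on A's stack is a known node name
def pvInvS (graph : List (String × List (String × Int))) (result : String)
    (s : List (String × List String × Int)) : Prop :=
  ∀ f ∈ s, f.1 ∈ pvNodes graph result

-- visited sets only grow
def pvSub (v v' : PySem.Set String) : Prop := ∀ x : String, x ∈ v → x ∈ v'

theorem pvSub_refl (v : PySem.Set String) : pvSub v v := fun _ h => h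

theorem pvSub_trans {a b c : PySem.Set String} (h1 : pvSub a b) (h2 : pvSub b c) : pvSub a c :=
  fun x hx => h2 x (h1 x hx)

theorem pvSub_add (v : PySem.Set String) (n : String) : pvSub v (PySem.Set.add v n) :=
  fun x hx => (PySem.Set.mem_add v n x).mpr (Or.inl hx)

-- every neighbour of every node is a known node name
theorem pvGet_sub (graph : List (String × List (String × Int))) (u : String) :
    ∀ nw ∈ pvGet graph u, ∃ e ∈ graph, nw ∈ e.2 := by
  induction graph with
  | nil => intro nw h; simp [pvGet] at h
  | cons e g IH =>
    intro nw h
    rw [pvGet] at h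
    by_cases hk : e.1 = u
    · exact ⟨e, by simp, by simpa [hk] using h⟩
    · obtain ⟨e', he', hnw⟩ := IH nw (by simpa [hk] using h)
      exact ⟨e', by simp [he'], hnw⟩

theorem pvGet_mem (graph : List (String × List (String × Int))) (result u : String) :
    ∀ nw ∈ pvGet graph u, nw.1 ∈ pvNodes graph result := by
  intro nw h
  obtain ⟨e, he, hnw⟩ := pvGet_sub graph u nw h
  simp only [pvNodes, List.mem_cons, List.mem_flatMap]
  exact Or.inr ⟨e, he, List.mem_map.mpr ⟨nw, hnw, rfl⟩⟩

-- generic sum-over-filter lemmas used for both potentials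
theorem pvSumFilterMono (f : String → Nat) (p q : String → Bool)
    (h : ∀ u, p u = true → q u = true) :
    ∀ l : List String, ((l.filter p).map f).sum ≤ ((l.filter q).map f).sum := by
  intro l
  induction l with
  | nil => simp
  | cons a t IH =>
    by_cases hp : p a = true
    · simp [hp, h a hp]; omega
    · rw [Bool.not_eq_true] at hp
      cases hq : q a
      · simpa [hp, hq] using IH
      · simp [hp, hq]; omega

theorem pvSumFilterAdd (f : String → Nat) (v : PySem.Set String) (n : String) :
    ∀ l : List String, l.Nodup → n ∈ l → n ∉ v →
    ((l.filter (fun u => !decide (u ∈ v) && !decide (u = n))).map f).sum + f n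
      = ((l.filter (fun u => !decide (u ∈ v))).map f).sum := by
  intro l
  induction l with
  | nil => intro _ h; simp at h
  | cons a t IH =>
    intro hnd hmem hnv
    by_cases ha : a = n
    · subst ha
      have hnt : a ∉ t := (List.nodup_cons.mp hnd).1
      have hft : t.filter (fun u => !decide (u ∈ v) && !decide (u = a))
          = t.filter (fun u => !decide (u ∈ v)) := by
        apply List.filter_congr
        intro u hu
        have hne : u ≠ a := fun he => hnt (he ▸ hu)
        simp [hne]
      simp [List.filter_cons, hnv, hft]
      omega
    · have hmt : n ∈ t := by
        rcases List.mem_cons.mp hmem with h | h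
        · exact absurd h.symm ha
        · exact h
      have IH' := IH (List.nodup_cons.mp hnd).2 hmt hnv
      by_cases hav : a ∈ v
      · simpa [List.filter_cons, hav] using IH'
      · simp [List.filter_cons, hav, ha]
        omega

theorem pvCntW_add {graph : List (String × List (String × Int))} {result n : String}
    {v : PySem.Set String} (h1 : n ∈ pvNodes graph result) (h2 : n ∉ v) :
    pvCntW graph result (PySem.Set.add v n) + pvW graph n = pvCntW graph result v := by
  unfold pvCntW pvUnvis
  have hc : (PySem.List.dedup (pvNodes graph result)).filter
        (fun u => !decide (u ∈ PySem.Set.add v n))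
      = (PySem.List.dedup (pvNodes graph result)).filter
        (fun u => !decide (u ∈ v) && !decide (u = n)) :=
    List.filter_congr (fun u _ => by
      by_cases h1 : u ∈ v <;> by_cases h2 : u = n <;> simp [PySem.Set.mem_add, h1, h2])
  rw [hc]
  exact pvSumFilterAdd (pvW graph) v n _ (PySem.List.nodup_dedup _)
    ((PySem.List.mem_dedup _ _).mpr h1) h2

theorem pvCntD_add {graph : List (String × List (String × Int))} {result n : String}
    {v : PySem.Set String} (h1 : n ∈ pvNodes graph result) (h2 : n ∉ v) :
    pvCntD graph result (PySem.Set.add v n) + 1 = pvCntD graph result v := by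
  unfold pvCntD pvUnvis
  have hc : (PySem.List.dedup (pvNodes graph result)).filter
        (fun u => !decide (u ∈ PySem.Set.add v n))
      = (PySem.List.dedup (pvNodes graph result)).filter
        (fun u => !decide (u ∈ v) && !decide (u = n)) :=
    List.filter_congr (fun u _ => by
      by_cases h1 : u ∈ v <;> by_cases h2 : u = n <;> simp [PySem.Set.mem_add, h1, h2])
  rw [hc]
  exact pvSumFilterAdd (fun _ => 1) v n _ (PySem.List.nodup_dedup _)
    ((PySem.List.mem_dedup _ _).mpr h1) h2

theorem pvCntD_mono {graph : List (String × List (String × Int))} {result : String}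
    {v v' : PySem.Set String} (h : pvSub v v') :
    pvCntD graph result v' ≤ pvCntD graph result v := by
  unfold pvCntD pvUnvis
  apply pvSumFilterMono
  intro u hu
  simp only [Bool.not_eq_true', decide_eq_false_iff_not] at hu ⊢
  exact fun hm => hu (h u hm)

theorem pvInvS_append {graph : List (String × List (String × Int))} {result : String}
    {s t : List (String × List String × Int)} (hs : pvInvS graph result s)
    (ht : pvInvS graph result t) : pvInvS graph result (s ++ t) := by
  intro f hf
  rcases List.mem_append.mp hf with h | h
  · exact hs f h
  · exact ht f h

theorem pvInvS_frames {graph : List (String × List (String × Int))} {result : String}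
    {path : List String} {cost : Int} {nbrs : List (String × Int)}
    (h : ∀ nw ∈ nbrs, nw.1 ∈ pvNodes graph result) :
    pvInvS graph result (pvFrames path cost nbrs) := by
  intro f hf
  obtain ⟨nw, hnw, rfl⟩ := List.mem_map.mp hf
  exact h nw hnw

-- the frames A pushes when expanding n (in simp normal form), as B sees them:
-- frames of the reversed adjacency list filtered against the updated visited set
theorem pvPushEq (graph : List (String × List (String × Int))) (v : PySem.Set String)
    (n : String) (p : List String) (c : Int) :
    ((List.filter (fun nw => !decide (nw.1 ∈ PySem.Set.add v n)) (pvGet graph n)).map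
        (fun nw => (nw.1, p ++ [nw.1], c + nw.2))).reverse
      = pvFrames p c (((pvGet graph n).reverse).filter
          (fun nw => !decide (nw.1 ∈ PySem.Set.add v n))) := by
  unfold pvFrames
  rw [← List.map_reverse, ← List.filter_reverse]

theorem pvPhi_cons (graph : List (String × List (String × Int))) (result : String)
    (v : PySem.Set String) (hd : String × List String × Int)
    (rest : List (String × List String × Int)) :
    pvPhi graph result v (hd :: rest) = pvPhi graph result v rest + 1 := by
  simp only [pvPhi, List.length_cons]
  omega

theorem pvInvS_tail {graph : List (String × List (String × Int))} {result : String}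
    {hd : String × List String × Int} {rest : List (String × List String × Int)}
    (h : pvInvS graph result (hd :: rest)) : pvInvS graph result rest :=
  fun f hf => h f (List.mem_cons_of_mem _ hf)

theorem pvInvS_push {graph : List (String × List (String × Int))} {result n : String}
    {v : PySem.Set String} {p : List String} {c : Int}
    {rest : List (String × List String × Int)}
    (hrest : pvInvS graph result rest) :
    pvInvS graph result
      (((List.filter (fun nw => !decide (nw.1 ∈ PySem.Set.add v n)) (pvGet graph n)).map
          (fun nw => (nw.1, p ++ [nw.1], c + nw.2))).reverse ++ rest) := by
  apply pvInvS_append _ hrest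
  intro f hf
  rw [List.mem_reverse] at hf
  obtain ⟨nw, hnw, rfl⟩ := List.mem_map.mp hf
  exact pvGet_mem graph result n nw (List.mem_of_mem_filter hnw)

-- the potential strictly drops (by at least 2) when an unvisited node is expanded
theorem pvPhi_push {graph : List (String × List (String × Int))} {result n : String}
    {v : PySem.Set String} {p : List String} {c : Int}
    {rest : List (String × List String × Int)}
    (hU : n ∈ pvNodes graph result) (hv : n ∉ v) :
    pvPhi graph result (PySem.Set.add v n)
        (((List.filter (fun nw => !decide (nw.1 ∈ PySem.Set.add v n)) (pvGet graph n)).map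
            (fun nw => (nw.1, p ++ [nw.1], c + nw.2))).reverse ++ rest) + 2
      ≤ pvPhi graph result v ((n, p, c) :: rest) := by
  have hw := pvCntW_add (v := v) hU hv
  have hlen : ((List.filter (fun nw => !decide (nw.1 ∈ PySem.Set.add v n))
      (pvGet graph n)).map (fun nw => (nw.1, p ++ [nw.1], c + nw.2))).length
      ≤ (pvGet graph n).length := by
    rw [List.length_map]
    exact List.length_filter_le _ _
  have hwn : pvW graph n = 1 + (pvGet graph n).length := rfl
  simp only [pvPhi, List.length_append, List.length_reverse, List.length_cons]
  omega

-- helper unfolding lemmas for A's canonical run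
theorem pvAref_nil (graph : List (String × List (String × Int))) (result goal : String)
    (v : PySem.Set String) : pvAref graph result goal v [] = none := by
  simp [pvAref, dfsLoop]

theorem pvAref_skip {graph : List (String × List (String × Int))} {result goal n : String}
    {v : PySem.Set String} {p : List String} {c : Int}
    {rest : List (String × List String × Int)}
    (h : n ∈ v) :
    pvAref graph result goal v ((n, p, c) :: rest) = pvAref graph result goal v rest := by
  have hcb : PySem.Set.contains v n = true := (PySem.Set.contains_iff v n).mpr h
  unfold pvAref
  rw [pvPhi_cons, dfsLoop]
  simp [h]

theorem pvAref_goal {graph : List (String × List (String × Int))} {result goal n : String}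
    {v : PySem.Set String} {p : List String} {c : Int}
    {rest : List (String × List String × Int)}
    (h : n ∉ v) (hg : n = goal) :
    pvAref graph result goal v ((n, p, c) :: rest) = some (p, c) := by
  subst hg
  unfold pvAref
  rw [pvPhi_cons, dfsLoop]
  simp [h]

-- A's loop is fuel-independent once the fuel exceeds the potential
theorem pvStab (graph : List (String × List (String × Int))) (result goal : String) :
    ∀ f v s, pvInvS graph result s → pvPhi graph result v s < f →
      dfsLoop graph goal f v s = pvAref graph result goal v s := by
  intro f
  induction f using Nat.strong_induction_on with
  | _ f IH =>
    intro v s hinv hphi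
    obtain ⟨f', rfl⟩ : ∃ f', f = f' + 1 := ⟨f - 1, by omega⟩
    cases s with
    | nil => simp [dfsLoop, pvAref]
    | cons hd rest =>
      obtain ⟨n, p, c⟩ := hd
      have hphic := pvPhi_cons graph result v (n, p, c) rest
      by_cases hc : n ∈ v
      · rw [dfsLoop, pvAref_skip hc]
        simp only [pvContains_eq, decide_eq_true_eq, if_pos hc]
        exact IH f' (by omega) v rest (pvInvS_tail hinv) (by omega)
      · by_cases hg : n = goal
        · rw [dfsLoop, pvAref_goal hc hg]
          subst hg
          simp [hc]
        · have hU : n ∈ pvNodes graph result := hinv (n, p, c) List.mem_cons_self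
          have hpush := pvPhi_push (p := p) (c := c) (rest := rest) hU hc
          have hinv' := pvInvS_push (n := n) (v := v) (p := p) (c := c) (pvInvS_tail hinv)
          rw [dfsLoop]
          conv_rhs => rw [pvAref, dfsLoop]
          simp only [pvContains_eq, decide_eq_true_eq, if_neg hc, if_neg hg]
          rw [IH f' (by omega) _ _ hinv' (by omega),
              IH (pvPhi graph result v ((n, p, c) :: rest)) (by omega) _ _ hinv' (by omega)]

theorem pvAref_visit {graph : List (String × List (String × Int))} {result goal n : String}
    {v : PySem.Set String} {p : List String} {c : Int}
    {rest : List (String × List String × Int)}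
    (h : n ∉ v) (hg : n ≠ goal)
    (hU : n ∈ pvNodes graph result) (hrest : pvInvS graph result rest) :
    pvAref graph result goal v ((n, p, c) :: rest)
      = pvAref graph result goal (PySem.Set.add v n)
          (((List.filter (fun nw => !decide (nw.1 ∈ PySem.Set.add v n)) (pvGet graph n)).map
              (fun nw => (nw.1, p ++ [nw.1], c + nw.2))).reverse ++ rest) := by
  have hpush := pvPhi_push (p := p) (c := c) (rest := rest) hU h
  have hinv' := pvInvS_push (n := n) (v := v) (p := p) (c := c) hrest
  conv_lhs => rw [pvAref, dfsLoop]
  simp only [pvContains_eq, decide_eq_true_eq, if_neg h, if_neg hg]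
  exact pvStab graph result goal _ _ _ hinv' (by omega)

-- B's visited set only grows
theorem pvMono (graph : List (String × List (String × Int))) (goal : String) :
    ∀ fuel : Nat,
      (∀ v node path cost, pvSub v (dfsGo graph goal fuel v node path cost).2) ∧
      (∀ v path cost nbrs, pvSub v (dfsTry graph goal fuel v path cost nbrs).2) := by
  intro fuel
  induction fuel with
  | zero =>
    constructor
    · intro v node path cost
      simp only [dfsGo]
      exact pvSub_refl v
    · intro v path cost nbrs
      induction nbrs generalizing v with
      | nil => simp only [dfsTry]; exact pvSub_refl v
      | cons hd tl IHn =>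
        obtain ⟨nb, w⟩ := hd
        rw [dfsTry]
        by_cases hc : nb ∈ v
        · simp only [pvContains_eq, decide_eq_true_eq, if_pos hc]
          exact IHn v
        · simp only [pvContains_eq, decide_eq_true_eq, if_neg hc, dfsGo]
          exact IHn v
  | succ f IHf =>
    obtain ⟨IHgo, IHtry⟩ := IHf
    have hgo : ∀ v node path cost, pvSub v (dfsGo graph goal (f + 1) v node path cost).2 := by
      intro v node path cost
      rw [dfsGo]
      by_cases hc : node ∈ v
      · simp only [pvContains_eq, decide_eq_true_eq, if_pos hc]
        exact pvSub_refl v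
      · simp only [pvContains_eq, decide_eq_true_eq, if_neg hc]
        by_cases hg : node = goal
        · simp only [if_pos hg]
          exact pvSub_add v node
        · simp only [if_neg hg]
          exact pvSub_trans (pvSub_add v node) (IHtry _ _ _ _)
    refine ⟨hgo, ?_⟩
    intro v path cost nbrs
    induction nbrs generalizing v with
    | nil => simp only [dfsTry]; exact pvSub_refl v
    | cons hd tl IHn =>
      obtain ⟨nb, w⟩ := hd
      rw [dfsTry]
      by_cases hc : nb ∈ v
      · simp only [pvContains_eq, decide_eq_true_eq, if_pos hc]
        exact IHn v
      · simp only [pvContains_eq, decide_eq_true_eq, if_neg hc]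
        rcases hgo2 : dfsGo graph goal (f + 1) v nb (path ++ [nb]) (cost + w) with ⟨r, v'⟩
        have hsub : pvSub v v' := by
          have := hgo v nb (path ++ [nb]) (cost + w)
          rw [hgo2] at this
          exact this
        cases r with
        | some r => exact hsub
        | none => exact pvSub_trans hsub (IHn v')

-- the central simulation lemma: A's flat stack explores exactly like B's recursion
theorem pvMain (graph : List (String × List (String × Int))) (result goal : String) :
    ∀ k : Nat, ∀ nbrs : List (String × Int),
      ∀ (v₀ v : PySem.Set String) (path : List String) (cost : Int)
        (rest : List (String × List String × Int)) (fB : Nat),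
      pvCntD graph result v < k →
      pvSub v₀ v →
      (∀ nw ∈ nbrs, nw.1 ∈ pvNodes graph result) →
      pvInvS graph result rest →
      pvCntD graph result v < fB →
      pvAref graph result goal v
          (pvFrames path cost (nbrs.filter (fun nw => !decide (nw.1 ∈ v₀))) ++ rest)
        = (match dfsTry graph goal fB v path cost nbrs with
           | (some r, _) => some r
           | (none, v2) => pvAref graph result goal v2 rest) := by
  intro k
  induction k using Nat.strong_induction_on with
  | _ k IHk =>
    intro nbrs
    induction nbrs with
    | nil =>
      intro v₀ v path cost rest fB hk hsub hnb hrest hfB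
      rw [dfsTry]
      simp [pvFrames]
    | cons hd tl IHn =>
      intro v₀ v path cost rest fB hk hsub hnb hrest hfB
      obtain ⟨nb, w⟩ := hd
      rw [dfsTry]
      by_cases h0 : nb ∈ v₀
      · have hv : nb ∈ v := hsub nb h0
        simp only [pvContains_eq, decide_eq_true_eq, if_pos hv]
        have hdrop : ((nb, w) :: tl).filter (fun nw => !decide (nw.1 ∈ v₀))
            = tl.filter (fun nw => !decide (nw.1 ∈ v₀)) := by
          simp [List.filter_cons, h0]
        rw [hdrop]
        exact IHn v₀ v path cost rest fB hk hsub
          (fun nw h => hnb nw (List.mem_cons_of_mem _ h)) hrest hfB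
      · have hkeep : ((nb, w) :: tl).filter (fun nw => !decide (nw.1 ∈ v₀))
            = (nb, w) :: tl.filter (fun nw => !decide (nw.1 ∈ v₀)) := by
          simp [List.filter_cons, h0]
        rw [hkeep]
        have hfcons : pvFrames path cost ((nb, w) :: tl.filter (fun nw => !decide (nw.1 ∈ v₀)))
            = (nb, path ++ [nb], cost + w)
              :: pvFrames path cost (tl.filter (fun nw => !decide (nw.1 ∈ v₀))) := rfl
        rw [hfcons, List.cons_append]
        by_cases h1 : nb ∈ v
        · simp only [pvContains_eq, decide_eq_true_eq, if_pos h1]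
          rw [pvAref_skip h1]
          exact IHn v₀ v path cost rest fB hk hsub
            (fun nw h => hnb nw (List.mem_cons_of_mem _ h)) hrest hfB
        · simp only [pvContains_eq, decide_eq_true_eq, if_neg h1]
          obtain ⟨f', rfl⟩ : ∃ f', fB = f' + 1 := ⟨fB - 1, by omega⟩
          rw [dfsGo]
          simp only [pvContains_eq, decide_eq_true_eq, if_neg h1]
          have hnbU : nb ∈ pvNodes graph result := hnb (nb, w) List.mem_cons_self
          have hcd := pvCntD_add (v := v) hnbU h1
          have hrest' : pvInvS graph result
              (pvFrames path cost (tl.filter (fun nw => !decide (nw.1 ∈ v₀))) ++ rest) :=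
            pvInvS_append (pvInvS_frames (fun nw h =>
              hnb nw (List.mem_cons_of_mem _ (List.mem_of_mem_filter h)))) hrest
          by_cases hg : nb = goal
          · simp only [if_pos hg]
            rw [pvAref_goal h1 hg]
          · simp only [if_neg hg]
            rw [pvAref_visit h1 hg hnbU hrest', pvPushEq]
            have IH1 := IHk (pvCntD graph result v) hk ((pvGet graph nb).reverse)
              (PySem.Set.add v nb) (PySem.Set.add v nb) (path ++ [nb]) (cost + w)
              (pvFrames path cost (tl.filter (fun nw => !decide (nw.1 ∈ v₀))) ++ rest) f'
              (by omega) (pvSub_refl _)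
              (fun nw h => pvGet_mem graph result nb nw (List.mem_reverse.mp h))
              hrest' (by omega)
            rw [IH1]
            rcases htry : dfsTry graph goal f' (PySem.Set.add v nb) (path ++ [nb]) (cost + w)
                ((pvGet graph nb).reverse) with ⟨r1, v2⟩
            cases r1 with
            | some r => rfl
            | none =>
              have hsub12 : pvSub (PySem.Set.add v nb) v2 := by
                have hm := (pvMono graph goal f').2 (PySem.Set.add v nb) (path ++ [nb])
                  (cost + w) ((pvGet graph nb).reverse)
                rw [htry] at hm
                exact hm
              have hcd2 : pvCntD graph result v2 ≤ pvCntD graph result (PySem.Set.add v nb) :=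
                pvCntD_mono hsub12
              exact IHk (pvCntD graph result v) hk tl v₀ v2 path cost rest (f' + 1)
                (by omega)
                (pvSub_trans hsub (pvSub_trans (pvSub_add v nb) hsub12))
                (fun nw h => hnb nw (List.mem_cons_of_mem _ h)) hrest (by omega)

-- the deduplicated node list is at least as long as the unvisited count
theorem pvLenLe (graph : List (String × List (String × Int))) (p : String → Bool) :
    ∀ l : List String, (l.filter p).length ≤ (l.map (pvW graph)).sum := by
  intro l
  induction l with
  | nil => simp
  | cons a t IH =>
    have hwa : 1 ≤ pvW graph a := Nat.le_add_right 1 _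
    by_cases hp : p a = true
    · simp [List.filter_cons, hp]
      omega
    · rw [Bool.not_eq_true] at hp
      simp [List.filter_cons, hp]
      omega

theorem dfs_spec : Claim_equal_dfs := by
  intro graph result goal _hdom
  unfold Spec_dfs
  show dfs graph result goal = dfs_alt graph result goal
  have hS : pvFuel graph result
      = ((PySem.List.dedup (pvNodes graph result)).map (pvW graph)).sum + 2 := rfl
  have hcntW : pvCntW graph result PySem.Set.empty
      = ((PySem.List.dedup (pvNodes graph result)).map (pvW graph)).sum := by
    simp [pvCntW, pvUnvis, PySem.Set.empty]
  have hcntD0 : pvCntD graph result PySem.Set.empty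
      ≤ ((PySem.List.dedup (pvNodes graph result)).map (pvW graph)).sum := by
    unfold pvCntD pvUnvis
    rw [show ∀ x : List String, (x.map (fun _ => (1 : Nat))).sum = x.length from fun x => by simp]
    exact pvLenLe graph _ _
  have hresU : result ∈ pvNodes graph result := by simp [pvNodes]
  have h0 : result ∉ (PySem.Set.empty : PySem.Set String) := by simp [PySem.Set.empty]
  have hInv0 : pvInvS graph result [(result, [result], 0)] := by
    intro f hf
    rw [List.mem_singleton] at hf
    subst hf
    exact hresU
  have hA : dfs graph result goal
      = pvAref graph result goal PySem.Set.empty [(result, [result], 0)] := by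
    unfold dfs
    apply pvStab graph result goal _ _ _ hInv0
    have hphi0 : pvPhi graph result PySem.Set.empty [(result, [result], 0)]
        = 1 + pvCntW graph result PySem.Set.empty := by
      simp [pvPhi]
    omega
  rw [hA]
  obtain ⟨m, hm⟩ : ∃ m, pvFuel graph result = m + 1 := ⟨pvFuel graph result - 1, by omega⟩
  unfold dfs_alt
  rw [hm, dfsGo]
  simp only [pvContains_eq, decide_eq_true_eq, if_neg h0]
  by_cases hg : result = goal
  · simp only [if_pos hg]
    rw [pvAref_goal h0 hg]
  · simp only [if_neg hg]
    have hnilInv : pvInvS graph result ([] : List (String × List String × Int)) := by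
      intro f hf
      cases hf
    rw [show [(result, [result], (0 : Int))] = (result, [result], (0 : Int)) :: [] from rfl,
        pvAref_visit h0 hg hresU hnilInv, pvPushEq]
    have hcd := pvCntD_add (v := PySem.Set.empty) hresU h0
    have hMain := pvMain graph result goal
      (pvCntD graph result (PySem.Set.add PySem.Set.empty result) + 1)
      ((pvGet graph result).reverse)
      (PySem.Set.add PySem.Set.empty result) (PySem.Set.add PySem.Set.empty result)
      [result] 0 [] m
      (by omega) (pvSub_refl _)
      (fun nw h => pvGet_mem graph result result nw (List.mem_reverse.mp h))
      hnilInv (by omega)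
    rw [hMain]
    rcases htry : dfsTry graph goal m (PySem.Set.add PySem.Set.empty result) [result] 0
        ((pvGet graph result).reverse) with ⟨r1, v2⟩
    cases r1 with
    | some r => rfl
    | none => exact pvAref_nil graph result goal v2
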